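-- pv_equiv track=rewrite | github.com/tmduddy/advent-of-code | utilities.py | create_canvas
-- ===== SOURCE A (Python) =====
-- def create_canvas(path):
--     xs = [loc[0] for loc in path]
--     ys = [loc[1] for loc in path]
--     x_offset = 0
--     y_offset = 0
--     min_x = min(xs)
--     min_y = min(ys)
--     if min_x <= 0:
--         x_offset = abs(min_x) + 1
--     if min_y <= 0:
--         y_offset = abs(min_y) + 1
--     num_xs = max(xs) + x_offset
--     num_ys = max(ys) + y_offset
--     canvas = [['' for _ in range(num_ys)] for _ in range(num_xs)]
--     return canvas, x_offset, y_offset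
-- ===== SOURCE B (Python) =====
-- def create_canvas(path):
--     # sort each coordinate list once; the extrema are the endpoints of the sorted lists
--     xs = sorted(loc[0] for loc in path)
--     ys = sorted(loc[1] for loc in path)
--     min_x, max_x = xs[0], xs[-1]
--     min_y, max_y = ys[0], ys[-1]
--     x_offset = abs(min_x) + 1 if min_x <= 0 else 0
--     y_offset = abs(min_y) + 1 if min_y <= 0 else 0
--     canvas = [[''] * (max_y + y_offset) for _ in range(max_x + x_offset)]
--     return canvas, x_offset, y_offset
-- ===== Notes on version B (the rewrite author's own statement) =====
-- stated objective: alternative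
-- what changed: B finds the four extrema by sorting each coordinate list once and reading the endpoints (xs[0]/xs[-1]) instead of A's four separate min/max scans, and builds each canvas row by list replication instead of a per-cell comprehension.
import Mathlib
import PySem

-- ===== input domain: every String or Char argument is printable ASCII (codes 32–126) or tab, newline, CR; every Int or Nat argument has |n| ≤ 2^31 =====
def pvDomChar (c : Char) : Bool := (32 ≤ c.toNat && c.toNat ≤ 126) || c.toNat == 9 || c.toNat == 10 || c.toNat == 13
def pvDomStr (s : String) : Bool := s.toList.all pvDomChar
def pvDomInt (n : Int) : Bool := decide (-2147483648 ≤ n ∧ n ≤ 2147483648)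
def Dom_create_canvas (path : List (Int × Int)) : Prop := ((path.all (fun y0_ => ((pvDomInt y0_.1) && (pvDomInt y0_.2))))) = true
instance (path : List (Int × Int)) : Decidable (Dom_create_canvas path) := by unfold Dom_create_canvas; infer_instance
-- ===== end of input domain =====

-- B finds the extrema by sorting each coordinate list once and reading the endpoints,
-- instead of A's four min/max scans; same return value on every non-empty path.

-- ===== PORT A =====
def create_canvas (path : List (Int × Int)) : List (List String) × Int × Int :=
  let xs := path.map (fun loc => loc.1)
  let ys := path.map (fun loc => loc.2)
  let x_offset : Int := 0
  let y_offset : Int := 0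
  let min_x := (PySem.List.min? xs (fun v => v)).getD 0
  let min_y := (PySem.List.min? ys (fun v => v)).getD 0
  let x_offset := if min_x ≤ 0 then |min_x| + 1 else x_offset
  let y_offset := if min_y ≤ 0 then |min_y| + 1 else y_offset
  let num_xs := (PySem.List.max? xs (fun v => v)).getD 0 + x_offset
  let num_ys := (PySem.List.max? ys (fun v => v)).getD 0 + y_offset
  let canvas := (List.range num_xs.toNat).map (fun _ => (List.range num_ys.toNat).map (fun _ => ""))
  (canvas, x_offset, y_offset)

-- ===== PORT B =====
def create_canvas_alt (path : List (Int × Int)) : List (List String) × Int × Int :=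
  let xs := PySem.List.sorted (path.map (fun loc => loc.1)) (fun v => v) false
  let ys := PySem.List.sorted (path.map (fun loc => loc.2)) (fun v => v) false
  -- the four indexings raise IndexError on the empty path (outside Pre_); none = IndexError
  match PySem.List.pyGet? xs 0, PySem.List.pyGet? xs (-1),
        PySem.List.pyGet? ys 0, PySem.List.pyGet? ys (-1) with
  | some min_x, some max_x, some min_y, some max_y =>
    let x_offset : Int := if min_x ≤ 0 then |min_x| + 1 else 0
    let y_offset : Int := if min_y ≤ 0 then |min_y| + 1 else 0
    let canvas := (List.range (max_x + x_offset).toNat).map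
      (fun _ => List.replicate (max_y + y_offset).toNat "")
    (canvas, x_offset, y_offset)
  | _, _, _, _ => ([], 0, 0)

-- ===== PRECONDITION & SPEC =====
-- A raises ValueError (min of empty sequence) on the empty path; excluded.
def Pre_create_canvas (path : List (Int × Int)) : Prop := path ≠ []
instance (path : List (Int × Int)) : Decidable (Pre_create_canvas path) := by unfold Pre_create_canvas; infer_instance
def pvWitness_create_canvas : (List (Int × Int)) := [(1, 2), (-1, 0)]

def Spec_create_canvas (path : List (Int × Int)) (out : List (List String) × Int × Int) : Prop := out = create_canvas_alt path
instance (path : List (Int × Int)) (out : List (List String) × Int × Int) : Decidable (Spec_create_canvas path out) := by unfold Spec_create_canvas; infer_instance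

-- ===== CLAIM (what is proved, stated in full; the proofs are below) =====
def Claim_equal_create_canvas : Prop := ∀ (path : List (Int × Int)), Dom_create_canvas path → Pre_create_canvas path → Spec_create_canvas path (create_canvas path)

-- ===== LEMMAS AND PROOFS =====

theorem sorted_first_eq_min (x : Int) (t : List Int) :
    PySem.List.pyGet? (PySem.List.sorted (x :: t) (fun v => v) false) 0 = some (t.foldl min x) := by
  have hne : PySem.List.sorted (x :: t) (fun v => v) false ≠ [] := by
    simp [PySem.List.sorted_eq_nil_iff]
  obtain ⟨m, r, hs⟩ := List.exists_cons_of_ne_nil hne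
  have hmem_m : m ∈ x :: t := by
    have : m ∈ PySem.List.sorted (x :: t) (fun v => v) false := by rw [hs]; exact List.mem_cons_self
    simpa [PySem.List.mem_sorted] using this
  have hmin : PySem.List.min? (x :: t) (fun v => v) = some (t.foldl min x) :=
    PySem.List.min?_id_cons x t
  have h1 : t.foldl min x ≤ m := PySem.List.min?_isMin hmin m hmem_m
  have h2 : m ≤ t.foldl min x :=
    PySem.List.key_head_sorted_le _ _ hs _ (PySem.List.min?_mem hmin)
  rw [hs, PySem.List.pyGet?_zero_cons]
  exact congrArg some (le_antisymm h2 h1)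

theorem sorted_last_eq_max (x : Int) (t : List Int) :
    PySem.List.pyGet? (PySem.List.sorted (x :: t) (fun v => v) false) (-1) = some (t.foldl max x) := by
  set s := PySem.List.sorted (x :: t) (fun v => v) false with hsdef
  have hne : s ≠ [] := by simp [hsdef, PySem.List.sorted_eq_nil_iff]
  have hlen : 0 < s.length := List.length_pos_iff.mpr hne
  have hlast_mem : s.getLast hne ∈ x :: t := by
    have : s.getLast hne ∈ s := List.getLast_mem hne
    simpa only [hsdef, PySem.List.mem_sorted] using this
  have hmax : PySem.List.max? (x :: t) (fun v => v) = some (t.foldl max x) :=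
    PySem.List.max?_id_cons x t
  have h1 : s.getLast hne ≤ t.foldl max x := PySem.List.max?_isMax hmax _ hlast_mem
  have h2 : t.foldl max x ≤ s.getLast hne := by
    have hmem : t.foldl max x ∈ s := by
      rw [hsdef, PySem.List.mem_sorted]
      exact PySem.List.max?_mem hmax
    obtain ⟨i, hi, hval⟩ := List.mem_iff_getElem.mp hmem
    have hsl : (PySem.List.sorted (x :: t) (fun v => v) false).length = s.length := by rw [hsdef]
    have hmono := PySem.List.sorted_id_getElem_mono (xs := x :: t)
      (p := i) (q := s.length - 1) (by omega) (by omega)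
    rw [List.getLast_eq_getElem]
    calc t.foldl max x = s[i] := hval.symm
      _ ≤ s[s.length - 1] := by simpa [← hsdef] using hmono
  rw [PySem.List.pyGet?_neg_one, List.getLast?_eq_some_getLast hne]
  exact congrArg some (le_antisymm h1 h2)

-- ===== VERDICT (by name: the statement is the Claim_ definition above) =====
theorem create_canvas_spec : Claim_equal_create_canvas := by
  intro path _ hpre
  unfold Spec_create_canvas
  match path with
  | [] => exact absurd rfl hpre
  | (x0, y0) :: rest =>
    simp only [create_canvas, create_canvas_alt, List.map_cons,
      sorted_first_eq_min, sorted_last_eq_max,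
      PySem.List.min?_id_cons, PySem.List.max?_id_cons, Option.getD_some]
    simp [List.map_const']
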